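-- pv_equiv track=rewrite | github.com/garciaha/DE_daily_challenges | 2020-07-17/exit.py | can_exit
-- ===== SOURCE A (Python) =====
-- def adj_list(pos, maze):
--     a = pos[0]
--     b = pos[1]
--     return [(a+x, b+y) for x in range(-1, 2) for y in range(-1, 2) if 0 <= a+x and a+x < len(maze) and 0 <= b+y and b+y < len(maze[a+x]) and maze[a+x][b+y] == 0]
--
-- def can_exit(maze):
--     start = (0, 0)
--     end = (len(maze) - 1, len(maze[0]) - 1)
--     queue = [start]
--     visited = [start]
--     while len(queue) > 0:
--         current = queue.pop(0)
--         adj = adj_list(current, maze)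
--         for next in adj:
--             if next not in visited:
--                 queue.append(next)
--                 visited.append(next)
--                 if next == end:
--                     return True
--     return False
-- ===== SOURCE B (Python) =====
-- def can_exit(maze):
--     rows = len(maze)
--     end = (rows - 1, len(maze[0]) - 1)
--     # level-synchronous search: discover whole layers at once with set arithmetic
--     reach = {(0, 0)}
--     frontier = {(0, 0)}
--     while True:
--         new = {(a + x, b + y)
--                for (a, b) in frontier
--                for x in (-1, 0, 1)
--                for y in (-1, 0, 1)
--                if 0 <= a + x < rows and 0 <= b + y < len(maze[a + x])
--                and maze[a + x][b + y] == 0} - reach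
--         if end in new:
--             return True
--         if not new:
--             return False
--         reach |= new
--         frontier = new
-- ===== Notes on version B (the rewrite author's own statement) =====
-- stated objective: alternative
-- what changed: Replaced the FIFO-queue BFS with its linear-scan visited list by a queue-free level-synchronous search: each round discovers the whole next layer at once with set arithmetic (a neighbour set-comprehension minus the reached set), tests the exit against the discovered layer, and stops when no new cells appear.
import Mathlib
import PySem

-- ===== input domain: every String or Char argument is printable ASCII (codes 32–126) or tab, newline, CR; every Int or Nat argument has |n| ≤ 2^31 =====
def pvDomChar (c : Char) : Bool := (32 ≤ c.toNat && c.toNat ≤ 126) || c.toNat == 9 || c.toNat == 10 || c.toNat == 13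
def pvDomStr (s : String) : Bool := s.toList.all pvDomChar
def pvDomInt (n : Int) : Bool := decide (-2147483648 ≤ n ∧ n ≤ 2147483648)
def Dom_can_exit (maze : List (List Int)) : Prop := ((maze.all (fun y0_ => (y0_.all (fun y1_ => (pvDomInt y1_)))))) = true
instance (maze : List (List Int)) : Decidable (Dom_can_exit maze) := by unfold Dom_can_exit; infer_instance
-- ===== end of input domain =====

-- B replaces the FIFO-queue BFS (linear-scan visited list) by a queue-free level-synchronous
-- search: each round discovers the whole next layer with set arithmetic and tests the exit there.

-- ===== PORT A =====
-- adj_list(pos, maze): the list comprehension over x, y in range(-1, 2);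
-- maze[a+x] and maze[a+x][b+y] are read only after the bounds guard (Python's 'and'
-- short-circuits), so PySem.List.pyGetD with a default is exact here.
def adj_list (pos : Int × Int) (maze : List (List Int)) : List (Int × Int) :=
  let a := pos.1
  let b := pos.2
  (PySem.List.pyRange (-1) 2 1).flatMap (fun x =>
    ((PySem.List.pyRange (-1) 2 1).filter (fun y =>
      decide (0 ≤ a + x) && decide (a + x < (maze.length : Int)) && decide (0 ≤ b + y) &&
      decide (b + y < ((PySem.List.pyGetD maze (a + x) []).length : Int)) &&
      (PySem.List.pyGetD (PySem.List.pyGetD maze (a + x) []) (b + y) 1 == 0))).map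
      (fun y => (a + x, b + y)))

-- the 'for next in adj' body: threads (queue, visited); first component true = the 'return True'
def processAdj (endp : Int × Int) :
    List (Int × Int) → List (Int × Int) → List (Int × Int) →
    Bool × List (Int × Int) × List (Int × Int)
  | [], q, v => (false, q, v)
  | n :: rest, q, v =>
    if v.contains n then processAdj endp rest q v
    else if n == endp then (true, q ++ [n], v ++ [n])
    else processAdj endp rest (q ++ [n]) (v ++ [n])

-- the 'while len(queue) > 0' loop. The fuel argument only makes the recursion total; it is
-- never exhausted on the inputs the claims cover (bfs_master below proves the loop's answer
-- with this fuel), and each iteration is exactly one Python iteration.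
def bfsLoop (maze : List (List Int)) (endp : Int × Int) :
    Nat → List (Int × Int) → List (Int × Int) → Bool
  | 0, _, _ => false
  | _ + 1, [], _ => false
  | fuel + 1, c :: queue, visited =>
    match processAdj endp (adj_list c maze) queue visited with
    | (true, _, _) => true
    | (false, q', v') => bfsLoop maze endp fuel q' v'

-- maze[0] raises IndexError on the empty maze; that input is excluded by Pre_can_exit
def can_exit (maze : List (List Int)) : Bool :=
  let start : Int × Int := (0, 0)
  let endp : Int × Int := ((maze.length : Int) - 1, ((PySem.List.pyGetD maze 0 []).length : Int) - 1)
  bfsLoop maze endp ((maze.map List.length).sum + 2) [start] [start]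

-- ===== PORT B =====
-- the neighbour set-comprehension body of Source B (offsets from the literal tuples (-1, 0, 1))
def openNbrs (maze : List (List Int)) (p : Int × Int) : List (Int × Int) :=
  let a := p.1
  let b := p.2
  ([-1, 0, 1] : List Int).flatMap (fun x =>
    (([-1, 0, 1] : List Int).filter (fun y =>
      decide (0 ≤ a + x) && decide (a + x < (maze.length : Int)) && decide (0 ≤ b + y) &&
      decide (b + y < ((PySem.List.pyGetD maze (a + x) []).length : Int)) &&
      (PySem.List.pyGetD (PySem.List.pyGetD maze (a + x) []) (b + y) 1 == 0))).map
      (fun y => (a + x, b + y)))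

-- the 'while True' level loop. The fuel argument only makes the recursion total; a round with
-- no new cells is always reached before exhaustion on the inputs the claims cover (sat_master
-- below), and each iteration is exactly one Python round.
def satLoop (maze : List (List Int)) (endp : Int × Int) :
    Nat → PySem.Set (Int × Int) → PySem.Set (Int × Int) → Bool
  | 0, _, _ => false
  | fuel + 1, reach, frontier =>
    let nw := PySem.Set.diff (PySem.Set.ofList (frontier.flatMap (openNbrs maze))) reach
    if nw.contains endp then true
    else if nw.isEmpty then false
    else satLoop maze endp fuel (PySem.Set.union reach nw) nw

-- maze[0] raises IndexError on the empty maze; that input is excluded by Pre_can_exit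
def can_exit_alt (maze : List (List Int)) : Bool :=
  let rows : Int := maze.length
  let endp : Int × Int := (rows - 1, ((PySem.List.pyGetD maze 0 []).length : Int) - 1)
  satLoop maze endp ((maze.map List.length).sum + 2)
    (PySem.Set.ofList [((0 : Int), (0 : Int))]) (PySem.Set.ofList [((0 : Int), (0 : Int))])

-- ===== PRECONDITION & SPEC =====
-- Pre_ excludes only the empty maze [], on which Python A raises IndexError at maze[0]
def Pre_can_exit (maze : List (List Int)) : Prop := maze ≠ []
instance (maze : List (List Int)) : Decidable (Pre_can_exit maze) := by unfold Pre_can_exit; infer_instance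
def pvWitness_can_exit : List (List Int) := [[0, 0], [1, 0]]

def Spec_can_exit (maze : List (List Int)) (out : Bool) : Prop := out = can_exit_alt maze
instance (maze : List (List Int)) (out : Bool) : Decidable (Spec_can_exit maze out) := by unfold Spec_can_exit; infer_instance

-- ===== CLAIM (what is proved, stated in full; the proofs are below) =====
def Claim_equal_can_exit : Prop := ∀ (maze : List (List Int)), Dom_can_exit maze → Pre_can_exit maze → Spec_can_exit maze (can_exit maze)

-- ===== LEMMAS AND PROOFS =====

-- a cell that can be stepped onto: in range and open
def okCell (maze : List (List Int)) (n : Int × Int) : Prop :=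
  0 ≤ n.1 ∧ n.1 < (maze.length : Int) ∧ 0 ≤ n.2 ∧
  n.2 < ((PySem.List.pyGetD maze n.1 []).length : Int) ∧
  PySem.List.pyGetD (PySem.List.pyGetD maze n.1 []) n.2 1 = 0

def Step (maze : List (List Int)) (u n : Int × Int) : Prop := n ∈ adj_list u maze

def Reach (maze : List (List Int)) (n : Int × Int) : Prop :=
  Relation.ReflTransGen (Step maze) (0, 0) n

-- all in-range cells, as a list (for the cardinality / fuel bound)
def allCells (maze : List (List Int)) : List (Int × Int) :=
  (List.range maze.length).flatMap (fun r =>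
    (List.range (maze.getD r []).length).map (fun c => ((r : Int), (c : Int))))

-- the set of nodes reachable from the worklist, modulo the visited set
def RQ (maze : List (List Int)) (q : List (Int × Int)) (n : Int × Int) : Prop :=
  ∃ u ∈ q, Relation.ReflTransGen (Step maze) u n
lemma mem_adj_iff (maze : List (List Int)) (p n : Int × Int) :
    n ∈ adj_list p maze ↔
      (∃ x ∈ ([-1, 0, 1] : List Int), ∃ y ∈ ([-1, 0, 1] : List Int),
        n = (p.1 + x, p.2 + y)) ∧ okCell maze n := by
  simp only [adj_list, okCell, show PySem.List.pyRange (-1) 2 1 = [-1, 0, 1] from rfl,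
    List.mem_flatMap, List.mem_map, List.mem_filter]
  constructor
  · rintro ⟨x, hx, y, ⟨hy, hcond⟩, rfl⟩
    simp only [Bool.and_eq_true, decide_eq_true_eq, beq_iff_eq] at hcond
    exact ⟨⟨x, hx, y, hy, rfl⟩, hcond.1.1.1.1, hcond.1.1.1.2, hcond.1.1.2, hcond.1.2, hcond.2⟩
  · rintro ⟨⟨x, hx, y, hy, rfl⟩, h1, h2, h3, h4, h5⟩
    exact ⟨x, hx, y, ⟨hy, by simp_all⟩, rfl⟩

lemma mem_openNbrs_iff (maze : List (List Int)) (p n : Int × Int) :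
    n ∈ openNbrs maze p ↔ n ∈ adj_list p maze := by
  rw [show adj_list p maze = openNbrs maze p from rfl]

lemma okCell_mem_allCells (maze : List (List Int)) (n : Int × Int) (h : okCell maze n) :
    n ∈ allCells maze := by
  obtain ⟨h1, h2, h3, h4, h5⟩ := h
  simp only [allCells, List.mem_flatMap, List.mem_map, List.mem_range]
  refine ⟨n.1.toNat, by omega, n.2.toNat, ?_, ?_⟩
  · have e : maze.getD n.1.toNat [] = PySem.List.pyGetD maze n.1 [] := by
      rw [List.getD_eq_getElem _ _ (by omega), PySem.List.pyGetD_eq_getElem _ _ h1 h2]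
    rw [e]
    have hlt : n.2.toNat < (PySem.List.pyGetD maze n.1 []).length := by omega
    simp only [List.bind_eq_flatMap, List.mem_flatMap, List.mem_range, List.pure_def,
      List.mem_singleton]
    exact ⟨n.2.toNat, hlt, rfl⟩
  · ext <;> simp <;> omega

lemma length_allCells (maze : List (List Int)) :
    (allCells maze).length = (maze.map List.length).sum := by
  simp only [allCells, List.length_flatMap, List.length_map]
  congr 1
  apply List.ext_getElem (by simp)
  intro i h1 h2
  simp only [List.getElem_map, List.getElem_range]
  rw [List.getD_eq_getElem maze [] (by simpa using h2)]
  simp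

lemma card_bound (maze : List (List Int)) (v : List (Int × Int)) (hnd : v.Nodup)
    (hsub : ∀ x ∈ v, x = (0, 0) ∨ x ∈ allCells maze) :
    v.length ≤ (maze.map List.length).sum + 1 := by
  have hs : v ⊆ (0, 0) :: allCells maze := by
    intro x hx; rcases hsub x hx with h | h <;> simp [h]
  have hle : v.length ≤ ((0, 0) :: allCells maze).length := by
    calc v.length = v.toFinset.card := (List.toFinset_card_of_nodup hnd).symm
    _ ≤ ((0, 0) :: allCells maze).toFinset.card := Finset.card_le_card (fun x hx => by
        simp only [List.mem_toFinset] at *; exact hs hx)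
    _ ≤ _ := List.toFinset_card_le _
  simpa [length_allCells] using hle

lemma reach_mem (maze : List (List Int)) (V Q : List (Int × Int))
    (hcl : ∀ w ∈ V, w ∉ Q → ∀ n, Step maze w n → n ∈ V) (a b : Int × Int)
    (hab : Relation.ReflTransGen (Step maze) a b) (ha : a ∈ V ∨ RQ maze Q a) :
    b ∈ V ∨ RQ maze Q b := by
  induction hab using Relation.ReflTransGen.head_induction_on with
  | refl => exact ha
  | head h' h ih =>
    rename_i a' c' 
    apply ih
    rcases ha with haV | ⟨u, hu, hua⟩
    · by_cases haQ : a' ∈ Q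
      · exact Or.inr ⟨a', haQ, Relation.ReflTransGen.single h'⟩
      · exact Or.inl (hcl a' haV haQ c' h')
    · exact Or.inr ⟨u, hu, hua.tail h'⟩

lemma reach_closed (maze : List (List Int)) (R : List (Int × Int))
    (hcl : ∀ u ∈ R, ∀ n, Step maze u n → n ∈ R) (a b : Int × Int) (ha : a ∈ R)
    (hab : Relation.ReflTransGen (Step maze) a b) : b ∈ R := by
  induction hab with
  | refl => exact ha
  | tail _ hs ih => exact hcl _ ih _ hs

lemma processAdj_spec (endp : Int × Int) :
    ∀ (ns q v : List (Int × Int)), v.Nodup → (∀ x ∈ q, x ∈ v) →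
    (((processAdj endp ns q v).1 = true ↔ endp ∈ ns ∧ endp ∉ v) ∧
     ((processAdj endp ns q v).1 = false →
       (processAdj endp ns q v).2.2.Nodup ∧
       (∀ x, x ∈ (processAdj endp ns q v).2.2 ↔ x ∈ v ∨ x ∈ ns) ∧
       (∀ x, x ∈ (processAdj endp ns q v).2.1 ↔ x ∈ q ∨ (x ∈ ns ∧ x ∉ v)) ∧
       (processAdj endp ns q v).2.1.length + v.length = q.length + (processAdj endp ns q v).2.2.length ∧
       (∀ x ∈ (processAdj endp ns q v).2.1, x ∈ (processAdj endp ns q v).2.2))) := by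
  intro ns
  induction ns with
  | nil =>
    intro q v hnd hq
    refine ⟨by simp [processAdj], fun _ => ⟨hnd, by simp [processAdj], by simp [processAdj], by simp [processAdj], by simpa [processAdj] using hq⟩⟩
  | cons n rest ih =>
    intro q v hnd hq
    by_cases hv : n ∈ v
    · have hrw : processAdj endp (n :: rest) q v = processAdj endp rest q v := by
        simp [processAdj, hv]
      rw [hrw]
      obtain ⟨ih1, ih2⟩ := ih q v hnd hq
      constructor
      · rw [ih1]
        constructor
        · rintro ⟨h1, h2⟩; exact ⟨List.mem_cons_of_mem _ h1, h2⟩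
        · rintro ⟨h1, h2⟩
          rcases List.mem_cons.mp h1 with rfl | h1
          · exact absurd hv h2
          · exact ⟨h1, h2⟩
      · intro hf
        obtain ⟨a, b, c, d, e⟩ := ih2 hf
        refine ⟨a, fun x => ?_, fun x => ?_, d, e⟩
        · rw [b x]
          constructor
          · rintro (h | h)
            · exact Or.inl h
            · exact Or.inr (List.mem_cons_of_mem _ h)
          · rintro (h | h)
            · exact Or.inl h
            · rcases List.mem_cons.mp h with rfl | h
              · exact Or.inl hv
              · exact Or.inr h
        · rw [c x]
          constructor
          · rintro (h | ⟨h1, h2⟩)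
            · exact Or.inl h
            · exact Or.inr ⟨List.mem_cons_of_mem _ h1, h2⟩
          · rintro (h | ⟨h1, h2⟩)
            · exact Or.inl h
            · rcases List.mem_cons.mp h1 with rfl | h1
              · exact absurd hv h2
              · exact Or.inr ⟨h1, h2⟩
    · by_cases he : n = endp
      · subst he
        have hrw : processAdj n (n :: rest) q v = (true, q ++ [n], v ++ [n]) := by
          simp [processAdj, hv]
        rw [hrw]
        exact ⟨by simp [hv], by simp⟩
      · have hrw : processAdj endp (n :: rest) q v = processAdj endp rest (q ++ [n]) (v ++ [n]) := by
          simp [processAdj, hv, he]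
        rw [hrw]
        have hnd' : (v ++ [n]).Nodup := by
          rw [List.nodup_append]
          refine ⟨hnd, List.nodup_singleton n, fun x hx y hy => ?_⟩
          rw [List.mem_singleton] at hy
          subst hy
          exact fun h => hv (h ▸ hx)
        have hq' : ∀ x ∈ q ++ [n], x ∈ v ++ [n] := by
          intro x hx
          rcases List.mem_append.mp hx with h | h
          · exact List.mem_append.mpr (Or.inl (hq x h))
          · exact List.mem_append.mpr (Or.inr h)
        obtain ⟨ih1, ih2⟩ := ih (q ++ [n]) (v ++ [n]) hnd' hq'
        constructor
        · rw [ih1]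
          constructor
          · rintro ⟨h1, h2⟩
            refine ⟨List.mem_cons_of_mem _ h1, fun hev => h2 (List.mem_append.mpr (Or.inl hev))⟩
          · rintro ⟨h1, h2⟩
            rcases List.mem_cons.mp h1 with rfl | h1
            · exact absurd rfl he
            · refine ⟨h1, fun hev => ?_⟩
              rcases List.mem_append.mp hev with h | h
              · exact h2 h
              · exact he (List.mem_singleton.mp h).symm
        · intro hf
          obtain ⟨a, b, c, d, e⟩ := ih2 hf
          refine ⟨a, fun x => ?_, fun x => ?_, by simp at d ⊢; omega, e⟩
          · rw [b x]
            simp only [List.mem_append, List.mem_cons, List.not_mem_nil, or_false]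
            tauto
          · rw [c x]
            simp only [List.mem_append, List.mem_cons, List.not_mem_nil, or_false]
            constructor
            · rintro ((h | rfl) | ⟨h1, h2⟩)
              · exact Or.inl h
              · exact Or.inr ⟨Or.inl rfl, hv⟩
              · exact Or.inr ⟨Or.inr h1, fun hxv => h2 (Or.inl hxv)⟩
            · rintro (h | ⟨h1 | h1, h2⟩)
              · exact Or.inl (Or.inl h)
              · exact Or.inl (Or.inr h1)
              · by_cases hxn : x = n
                · exact Or.inl (Or.inr hxn)
                · exact Or.inr ⟨h1, fun hh => by rcases hh with hh | hh; exact h2 hh; exact hxn hh⟩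

lemma bfs_master (maze : List (List Int)) (endp : Int × Int) :
    ∀ (fuel : Nat) (q v : List (Int × Int)),
    (∀ x ∈ q, x ∈ v) → v.Nodup →
    (∀ x ∈ v, x = (0, 0) ∨ x ∈ allCells maze) →
    (∀ u ∈ v, u ∉ q → ∀ n, Step maze u n → n ∈ v) →
    ((maze.map List.length).sum + 1 + q.length ≤ fuel + v.length) →
    (bfsLoop maze endp fuel q v = true ↔ (RQ maze q endp ∧ endp ∉ v)) := by
  intro fuel
  induction fuel with
  | zero =>
    intro q v hq hnd hsub hcl hfuel
    have hvb := card_bound maze v hnd hsub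
    have hq0 : q = [] := List.length_eq_zero_iff.mp (by omega)
    subst hq0
    simp [bfsLoop, RQ]
  | succ fuel ih =>
    intro q v hq hnd hsub hcl hfuel
    match q with
    | [] => simp [bfsLoop, RQ]
    | c :: q =>
      have hq' : ∀ x ∈ q, x ∈ v := fun x hx => hq x (List.mem_cons_of_mem _ hx)
      obtain ⟨spec1, spec2⟩ := processAdj_spec endp (adj_list c maze) q v hnd hq'
      rcases hpa : processAdj endp (adj_list c maze) q v with ⟨hit, q', v'⟩
      rw [hpa] at spec1 spec2
      cases hit with
      | true =>
        have hstep : bfsLoop maze endp (fuel + 1) (c :: q) v = true := by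
          simp [bfsLoop, hpa]
        rw [hstep]
        obtain ⟨hein, henv⟩ := spec1.mp rfl
        simp only [true_iff]
        exact ⟨⟨c, List.mem_cons_self, Relation.ReflTransGen.single hein⟩, henv⟩
      | false =>
        have hstep : bfsLoop maze endp (fuel + 1) (c :: q) v = bfsLoop maze endp fuel q' v' := by
          simp [bfsLoop, hpa]
        obtain ⟨a, b, cc, d, e⟩ := spec2 rfl
        simp only at a b cc d e
        have hnotend : ¬(endp ∈ adj_list c maze ∧ endp ∉ v) := by
          intro h; exact absurd (spec1.mpr h) (by simp)
        have hsub' : ∀ x ∈ v', x = (0, 0) ∨ x ∈ allCells maze := by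
          intro x hx
          rcases (b x).mp hx with h | h
          · exact hsub x h
          · exact Or.inr (okCell_mem_allCells maze x ((mem_adj_iff maze c x).mp h).2)
        have hcl' : ∀ u ∈ v', u ∉ q' → ∀ n, Step maze u n → n ∈ v' := by
          intro u hu huq n hn
          have huv : u ∈ v := by
            rcases (b u).mp hu with h | h
            · exact h
            · by_cases h2 : u ∈ v
              · exact h2
              · exact absurd ((cc u).mpr (Or.inr ⟨h, h2⟩)) huq
          by_cases hc : u = c
          · subst hc
            exact (b n).mpr (Or.inr hn)
          · have huqq : u ∉ c :: q := by
              intro h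
              rcases List.mem_cons.mp h with h | h
              · exact hc h
              · exact huq ((cc u).mpr (Or.inl h))
            exact (b n).mpr (Or.inl (hcl u huv huqq n hn))
        have hih := ih q' v' e a hsub' hcl' (by
          simp only [List.length_cons] at hfuel
          omega)
        rw [hstep, hih]
        constructor
        · rintro ⟨⟨u, hu, p⟩, hnv'⟩
          have hnv : endp ∉ v := fun h => hnv' ((b endp).mpr (Or.inl h))
          refine ⟨?_, hnv⟩
          rcases (cc u).mp hu with h | ⟨h1, _⟩
          · exact ⟨u, List.mem_cons_of_mem _ h, p⟩
          · exact ⟨c, List.mem_cons_self, p.head h1⟩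
        · rintro ⟨⟨u, hu, p⟩, hnv⟩
          have hnv' : endp ∉ v' := by
            intro h
            rcases (b endp).mp h with h | h
            · exact hnv h
            · exact hnotend ⟨h, hnv⟩
          refine ⟨?_, hnv'⟩
          rcases List.mem_cons.mp hu with rfl | hu
          · have hcv' : u ∈ v' := (b u).mpr (Or.inl (hq u List.mem_cons_self))
            rcases reach_mem maze v' q' hcl' u endp p (Or.inl hcv') with h | h
            · exact absurd h hnv'
            · exact h
          · exact ⟨u, (cc u).mpr (Or.inl hu), p⟩

lemma sat_master (maze : List (List Int)) (endp : Int × Int) :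
    ∀ (fuel : Nat) (reach frontier : List (Int × Int)),
    reach.Nodup → (∀ x ∈ reach, x = (0, 0) ∨ x ∈ allCells maze) →
    (∀ x ∈ frontier, x ∈ reach) →
    (∀ u ∈ reach, u ∉ frontier → ∀ n, Step maze u n → n ∈ reach) →
    ((maze.map List.length).sum + 2 ≤ fuel + reach.length) →
    (satLoop maze endp fuel reach frontier = true ↔ (RQ maze frontier endp ∧ endp ∉ reach)) := by
  intro fuel
  induction fuel with
  | zero =>
    intro reach frontier hnd hsub hfr hcl hfuel
    have := card_bound maze reach hnd hsub
    omega
  | succ fuel ih =>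
    intro reach frontier hnd hsub hfr hcl hfuel
    set nw := PySem.Set.diff (PySem.Set.ofList (frontier.flatMap (openNbrs maze))) reach with hnw
    have hstep : satLoop maze endp (fuel + 1) reach frontier =
        if nw.contains endp then true
        else if nw.isEmpty then false
        else satLoop maze endp fuel (PySem.Set.union reach nw) nw := rfl
    rw [hstep]
    have hmemn : ∀ x, x ∈ nw ↔ ((∃ p ∈ frontier, x ∈ adj_list p maze) ∧ x ∉ reach) := by
      intro x
      rw [hnw, PySem.Set.mem_diff, PySem.Set.mem_ofList, List.mem_flatMap]
      simp only [mem_openNbrs_iff]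
    by_cases hend : nw.contains endp = true
    · rw [if_pos hend]
      obtain ⟨⟨p, hp, hstep'⟩, hnr⟩ := (hmemn endp).mp (List.contains_iff_mem.mp hend)
      simp only [true_iff]
      exact ⟨⟨p, hp, Relation.ReflTransGen.single hstep'⟩, hnr⟩
    · rw [if_neg hend]
      have hendn : endp ∉ nw := fun h => hend (List.contains_iff_mem.mpr h)
      by_cases hemp : nw.isEmpty
      · rw [if_pos hemp]
        have hempty : nw = [] := by simpa [List.isEmpty_iff] using hemp
        have hclosed : ∀ u ∈ reach, ∀ n, Step maze u n → n ∈ reach := by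
          intro u hu n hn
          by_cases huf : u ∈ frontier
          · by_contra hnr
            have : n ∈ nw := (hmemn n).mpr ⟨⟨u, huf, hn⟩, hnr⟩
            simp [hempty] at this
          · exact hcl u hu huf n hn
        simp only [Bool.false_eq_true, false_iff]
        rintro ⟨⟨u, hu, p⟩, hnr⟩
        exact hnr (reach_closed maze reach hclosed u endp (hfr u hu) p)
      · rw [if_neg hemp]
        have hfne : nw ≠ [] := by simpa [List.isEmpty_iff] using hemp
        have hfnd : nw.Nodup := by
          rw [hnw]
          exact PySem.Set.nodup_diff _ _ (PySem.Set.nodup_ofList _)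
        have hdisj : ∀ x ∈ nw, x ∉ reach := fun x hx => ((hmemn x).mp hx).2
        have hunion : PySem.Set.union reach nw = reach ++ nw :=
          PySem.Set.update_eq_append_of_disjoint _ _ hfnd hdisj
        have hnd' : (reach ++ nw).Nodup := by
          rw [List.nodup_append]
          exact ⟨hnd, hfnd, fun x hx y hy h => (hdisj y hy) (h ▸ hx)⟩
        have hsub' : ∀ x ∈ reach ++ nw, x = (0, 0) ∨ x ∈ allCells maze := by
          intro x hx
          rcases List.mem_append.mp hx with h | h
          · exact hsub x h
          · exact Or.inr (okCell_mem_allCells maze x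
              ((mem_adj_iff maze ((hmemn x).mp h).1.choose x).mp
                ((hmemn x).mp h).1.choose_spec.2).2)
        have hfr' : ∀ x ∈ nw, x ∈ reach ++ nw := fun x hx => List.mem_append.mpr (Or.inr hx)
        have hcl' : ∀ u ∈ reach ++ nw, u ∉ nw → ∀ n, Step maze u n → n ∈ reach ++ nw := by
          intro u hu hun n hn
          have hur : u ∈ reach := by
            rcases List.mem_append.mp hu with h | h
            · exact h
            · exact absurd h hun
          by_cases huf : u ∈ frontier
          · by_cases hnr : n ∈ reach
            · exact List.mem_append.mpr (Or.inl hnr)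
            · exact List.mem_append.mpr (Or.inr ((hmemn n).mpr ⟨⟨u, huf, hn⟩, hnr⟩))
          · exact List.mem_append.mpr (Or.inl (hcl u hur huf n hn))
        have hlen : 1 ≤ nw.length := List.length_pos_iff.mpr hfne
        rw [hunion]
        rw [ih (reach ++ nw) nw hnd' hsub' hfr' hcl' (by
          simp only [List.length_append]
          omega)]
        constructor
        · rintro ⟨⟨u, hu, p⟩, hnr'⟩
          obtain ⟨⟨p', hp', hstep'⟩, _⟩ := (hmemn u).mp hu
          refine ⟨⟨p', hp', p.head hstep'⟩, fun h => hnr' (List.mem_append.mpr (Or.inl h))⟩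
        · rintro ⟨⟨u, hu, p⟩, hnr⟩
          have hnr' : endp ∉ reach ++ nw := by
            intro h
            rcases List.mem_append.mp h with h | h
            · exact hnr h
            · exact hendn h
          refine ⟨?_, hnr'⟩
          have huv : u ∈ reach ++ nw := List.mem_append.mpr (Or.inl (hfr u hu))
          rcases reach_mem maze (reach ++ nw) nw hcl' u endp p (Or.inl huv) with h | h
          · exact absurd h hnr'
          · exact h

lemma can_exit_iff (maze : List (List Int)) :
    can_exit maze = true ↔
      (Reach maze ((maze.length : Int) - 1, ((PySem.List.pyGetD maze 0 []).length : Int) - 1) ∧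
       ((maze.length : Int) - 1, ((PySem.List.pyGetD maze 0 []).length : Int) - 1) ≠ ((0 : Int), (0 : Int))) := by
  show bfsLoop maze _ _ [(0, 0)] [(0, 0)] = true ↔ _
  rw [bfs_master maze _ _ [(0, 0)] [(0, 0)]
    (fun x hx => hx) (by simp) (fun x hx => Or.inl (by simpa using hx))
    (by intro u hu huq; exact absurd (by simpa using hu) (by simpa using huq))
    (by simp)]
  unfold RQ
  constructor
  · rintro ⟨⟨u, hu, p⟩, hne⟩
    rw [List.mem_singleton] at hu
    subst hu
    exact ⟨p, by simpa using hne⟩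
  · rintro ⟨p, hne⟩
    exact ⟨⟨(0, 0), List.mem_singleton.mpr rfl, p⟩, by simpa using hne⟩

lemma can_exit_alt_iff (maze : List (List Int)) :
    can_exit_alt maze = true ↔
      (Reach maze ((maze.length : Int) - 1, ((PySem.List.pyGetD maze 0 []).length : Int) - 1) ∧
       ((maze.length : Int) - 1, ((PySem.List.pyGetD maze 0 []).length : Int) - 1) ≠ ((0 : Int), (0 : Int))) := by
  show satLoop maze _ _ (PySem.Set.ofList [((0 : Int), (0 : Int))]) (PySem.Set.ofList [((0 : Int), (0 : Int))]) = true ↔ _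
  rw [show PySem.Set.ofList [((0 : Int), (0 : Int))] = [((0 : Int), (0 : Int))] from rfl]
  rw [sat_master maze _ _ [((0 : Int), (0 : Int))] [((0 : Int), (0 : Int))]
    (by simp) (fun x hx => Or.inl (by simpa using hx)) (fun x hx => hx)
    (by intro u hu huq; exact absurd (by simpa using hu) (by simpa using huq))
    (by simp)]
  unfold RQ
  constructor
  · rintro ⟨⟨u, hu, p⟩, hne⟩
    rw [List.mem_singleton] at hu
    subst hu
    exact ⟨p, by simpa using hne⟩
  · rintro ⟨p, hne⟩
    exact ⟨⟨(0, 0), List.mem_singleton.mpr rfl, p⟩, by simpa using hne⟩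

-- ===== VERDICT (by name: the statement is the Claim_ definition above) =====
theorem can_exit_spec : Claim_equal_can_exit := by
  intro maze _ _
  show can_exit maze = can_exit_alt maze
  have hbool : ∀ a b : Bool, (a = true ↔ b = true) → a = b := by decide
  apply hbool
  rw [can_exit_iff, can_exit_alt_iff]
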